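-- pv_equiv track=rewrite | github.com/Cathyyyyy123/dsc80-2023-fa | labs/lab01/lab.py | same_diff_ints
-- ===== SOURCE A (Python) =====
-- def same_diff_ints(ints):
--     if len(ints) == 0:
--         return False
--     for i in range(len(ints)):
--         for j in range(i + 1, len(ints)):
--             if abs(ints[i]-ints[j]) == j-i:
--                 return True
--     return False
-- ===== SOURCE B (Python) =====
-- def same_diff_ints(ints):
--     plus = set()
--     minus = set()
--     for i, v in enumerate(ints):
--         if v + i in plus or v - i in minus:
--             return True
--         plus.add(v + i)
--         minus.add(v - i)
--     return False
-- ===== Notes on version B (the rewrite author's own statement) =====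
-- stated objective: faster
-- what changed: Replaced the O(n^2) all-pairs scan with a single pass keeping hash sets of v+i and v-i: |a_i-a_j|=j-i iff a_i+i=a_j+j or a_i-i=a_j-j, so a repeated key detects a pair.
import Mathlib
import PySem

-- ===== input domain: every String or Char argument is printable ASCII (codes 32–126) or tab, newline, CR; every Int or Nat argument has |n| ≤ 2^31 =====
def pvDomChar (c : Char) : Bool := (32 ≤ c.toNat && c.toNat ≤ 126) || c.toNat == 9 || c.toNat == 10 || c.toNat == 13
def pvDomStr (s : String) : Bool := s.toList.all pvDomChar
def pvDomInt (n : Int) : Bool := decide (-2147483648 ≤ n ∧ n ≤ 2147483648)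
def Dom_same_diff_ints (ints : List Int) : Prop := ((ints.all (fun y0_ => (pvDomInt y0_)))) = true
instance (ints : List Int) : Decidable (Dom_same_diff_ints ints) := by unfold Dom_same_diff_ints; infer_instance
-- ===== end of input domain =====

-- B replaces A's O(n^2) all-pairs scan by one pass over the list keeping two sets
-- of the keys v+i and v-i; a repeated key marks a matching pair (proved equivalent below).

-- ===== PORT A =====
-- nested 'for' loops with early 'return True' transcribed as List.any over the index ranges
def same_diff_ints (ints : List Int) : Bool :=
  if ints.length == 0 then false
  else
    (List.range ints.length).any (fun i =>
      (List.range' (i + 1) (ints.length - (i + 1))).any (fun j =>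
        (ints.getD i 0 - ints.getD j 0).natAbs == j - i))

-- ===== PORT B =====
-- the loop of Source B: index counter plus the two Python sets, early return on a hit
def sameDiffLoop (l : List Int) (i : Int) (plus minus : PySem.Set Int) : Bool :=
  match l with
  | [] => false
  | v :: rest =>
      if plus.contains (v + i) || minus.contains (v - i) then true
      else sameDiffLoop rest (i + 1) (plus.add (v + i)) (minus.add (v - i))

def same_diff_ints_alt (ints : List Int) : Bool :=
  sameDiffLoop ints 0 PySem.Set.empty PySem.Set.empty

-- ===== PRECONDITION & SPEC =====
def Spec_same_diff_ints (ints : List Int) (out : Bool) : Prop := out = same_diff_ints_alt ints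
instance (ints : List Int) (out : Bool) : Decidable (Spec_same_diff_ints ints out) := by unfold Spec_same_diff_ints; infer_instance

-- ===== CLAIM (what is proved, stated in full; the proofs are below) =====
def Claim_equal_same_diff_ints : Prop := ∀ (ints : List Int), Dom_same_diff_ints ints → Spec_same_diff_ints ints (same_diff_ints ints)

-- ===== LEMMAS AND PROOFS =====

-- ===== VERDICT (by name: the statement is the Claim_ definition above) =====
-- characterisation of B's loop: a hit is an element whose key is already in the set
-- carried in, or collides with the key of an earlier element of the remaining list
theorem sameDiffLoop_iff (l : List Int) (i : Int) (plus minus : PySem.Set Int) :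
    sameDiffLoop l i plus minus = true ↔
      ∃ k : Nat, k < l.length ∧
        ((l.getD k 0 + (i + k) ∈ plus ∨
            ∃ m : Nat, m < k ∧ l.getD m 0 + (i + m) = l.getD k 0 + (i + k)) ∨
         (l.getD k 0 - (i + k) ∈ minus ∨
            ∃ m : Nat, m < k ∧ l.getD m 0 - (i + m) = l.getD k 0 - (i + k))) := by
  induction l generalizing i plus minus with
  | nil => simp [sameDiffLoop]
  | cons v rest ih =>
      simp only [sameDiffLoop]
      by_cases h : (plus.contains (v + i) || minus.contains (v - i)) = true
      · rw [if_pos h]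
        constructor
        · intro _
          refine ⟨0, by simp, ?_⟩
          have h' := h
          simp only [Bool.or_eq_true, PySem.Set.contains_eq_listContains,
            List.contains_eq_mem, decide_eq_true_eq] at h'
          rcases h' with h1 | h1
          · exact Or.inl (Or.inl (by simpa using h1))
          · exact Or.inr (Or.inl (by simpa using h1))
        · intro _; rfl
      · rw [if_neg h, ih]
        have h' := h
        simp only [Bool.or_eq_true, PySem.Set.contains_eq_listContains,
          List.contains_eq_mem, decide_eq_true_eq, not_or] at h'
        obtain ⟨hp, hm⟩ := h' 
        have hkey : ∀ n : Nat, (v :: rest).getD (n+1) 0 = rest.getD n 0 := fun n => rfl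
        constructor
        · rintro ⟨k, hk, hcase⟩
          refine ⟨k + 1, by simpa using hk, ?_⟩
          rcases hcase with (hmem | ⟨m, hm', heq⟩) | (hmem | ⟨m, hm', heq⟩)
          · rcases (PySem.Set.mem_add _ _ _).mp hmem with h1 | h1
            · refine Or.inl (Or.inl ?_)
              simp only [hkey]
              convert h1 using 2; push_cast; ring
            · refine Or.inl (Or.inr ⟨0, Nat.succ_pos _, ?_⟩)
              simp only [hkey, List.getD_cons_zero]
              push_cast at h1 ⊢; omega
          · refine Or.inl (Or.inr ⟨m + 1, by omega, ?_⟩)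
            simp only [hkey]
            convert heq using 2 <;> push_cast <;> ring
          · rcases (PySem.Set.mem_add _ _ _).mp hmem with h1 | h1
            · refine Or.inr (Or.inl ?_)
              simp only [hkey]
              convert h1 using 2; push_cast; ring
            · refine Or.inr (Or.inr ⟨0, Nat.succ_pos _, ?_⟩)
              simp only [hkey, List.getD_cons_zero]
              push_cast at h1 ⊢; omega
          · refine Or.inr (Or.inr ⟨m + 1, by omega, ?_⟩)
            simp only [hkey]
            convert heq using 2 <;> push_cast <;> ring
        · rintro ⟨k, hk, hcase⟩
          cases k with
          | zero =>
              exfalso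
              rcases hcase with (hmem | ⟨m, hm', _⟩) | (hmem | ⟨m, hm', _⟩)
              · exact hp (by simpa using hmem)
              · omega
              · exact hm (by simpa using hmem)
              · omega
          | succ k' =>
              refine ⟨k', by simpa using hk, ?_⟩
              rcases hcase with (hmem | ⟨m, hm', heq⟩) | (hmem | ⟨m, hm', heq⟩)
              · refine Or.inl (Or.inl ((PySem.Set.mem_add _ _ _).mpr (Or.inl ?_)))
                simp only [hkey] at hmem
                convert hmem using 2; push_cast; ring
              · cases m with
                | zero =>
                    refine Or.inl (Or.inl ((PySem.Set.mem_add _ _ _).mpr (Or.inr ?_)))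
                    simp only [hkey, List.getD_cons_zero] at heq
                    push_cast at heq ⊢; omega
                | succ m' =>
                    refine Or.inl (Or.inr ⟨m', by omega, ?_⟩)
                    simp only [hkey] at heq
                    convert heq using 2 <;> push_cast <;> ring
              · refine Or.inr (Or.inl ((PySem.Set.mem_add _ _ _).mpr (Or.inl ?_)))
                simp only [hkey] at hmem
                convert hmem using 2; push_cast; ring
              · cases m with
                | zero =>
                    refine Or.inr (Or.inl ((PySem.Set.mem_add _ _ _).mpr (Or.inr ?_)))
                    simp only [hkey, List.getD_cons_zero] at heq
                    push_cast at heq ⊢; omega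
                | succ m' =>
                    refine Or.inr (Or.inr ⟨m', by omega, ?_⟩)
                    simp only [hkey] at heq
                    convert heq using 2 <;> push_cast <;> ring

-- A = true iff some pair i < j has |a_i - a_j| = j - i
theorem same_diff_ints_iff (ints : List Int) :
    same_diff_ints ints = true ↔
      ∃ i j : Nat, i < j ∧ j < ints.length ∧
        (ints.getD i 0 - ints.getD j 0).natAbs = j - i := by
  unfold same_diff_ints
  by_cases hlen : ints.length = 0
  · simp [hlen]
  · simp only [beq_iff_eq, hlen, if_false, List.any_eq_true, List.mem_range,
      List.mem_range', beq_iff_eq]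
    constructor
    · rintro ⟨i, hi, j, ⟨d, hd, hj⟩, habs⟩
      exact ⟨i, j, by omega, by omega, habs⟩
    · rintro ⟨i, j, hij, hj, habs⟩
      exact ⟨i, by omega, j, ⟨j - (i+1), by omega, by omega⟩, habs⟩

theorem same_diff_ints_alt_iff (ints : List Int) :
    same_diff_ints_alt ints = true ↔
      ∃ k : Nat, k < ints.length ∧ ∃ m : Nat, m < k ∧
        (ints.getD m 0 + m = ints.getD k 0 + k ∨
         ints.getD m 0 - m = ints.getD k 0 - k) := by
  unfold same_diff_ints_alt
  rw [sameDiffLoop_iff]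
  constructor
  · rintro ⟨k, hk, hcase⟩
    rcases hcase with (hmem | ⟨m, hm, heq⟩) | (hmem | ⟨m, hm, heq⟩)
    · simp [PySem.Set.empty] at hmem
    · exact ⟨k, hk, m, hm, Or.inl (by simpa using heq)⟩
    · simp [PySem.Set.empty] at hmem
    · exact ⟨k, hk, m, hm, Or.inr (by simpa using heq)⟩
  · rintro ⟨k, hk, m, hm, heq | heq⟩
    · exact ⟨k, hk, Or.inl (Or.inr ⟨m, hm, by simpa using heq⟩)⟩
    · exact ⟨k, hk, Or.inr (Or.inr ⟨m, hm, by simpa using heq⟩)⟩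

-- ===== VERDICT =====
theorem same_diff_ints_spec : Claim_equal_same_diff_ints := by
  intro ints _
  unfold Spec_same_diff_ints
  have h : same_diff_ints ints = true ↔ same_diff_ints_alt ints = true := by
    rw [same_diff_ints_iff, same_diff_ints_alt_iff]
    constructor
    · rintro ⟨i, j, hij, hj, habs⟩
      refine ⟨j, hj, i, hij, ?_⟩
      have := Int.natAbs_eq (ints.getD i 0 - ints.getD j 0)
      omega
    · rintro ⟨k, hk, m, hm, heq | heq⟩ <;> exact ⟨m, k, hm, hk, by omega⟩
  cases hA : same_diff_ints ints <;> cases hB : same_diff_ints_alt ints <;>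
    simp_all
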